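-- pv_equiv track=rewrite | github.com/MateuszMarcisz/practice | codewars/2024/dec/dec30.py | array_manip
-- ===== SOURCE A (Python) =====
-- def array_manip(array):
--     new_arr = []
--     for idx, num in enumerate(array):
--         greater_elements = [n for n in array[idx + 1:] if n > num]
--
--         if greater_elements:
--             new_arr.append(min(greater_elements))
--         else:
--             new_arr.append(-1)
--
--     return new_arr
-- ===== SOURCE B (Python) =====
-- def _first_greater(s, num):
--     # s is sorted ascending; the first element > num is the minimum of all greater ones
--     for x in s:
--         if x > num:
--             return x
--     return -1
--
--
-- def _insert_sorted(s, num):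
--     for i, x in enumerate(s):
--         if x > num:
--             s.insert(i, num)
--             return
--     s.append(num)
--
--
-- def array_manip(array):
--     res = []
--     s = []  # sorted ascending multiset of the elements already seen (to the right)
--     for num in reversed(array):
--         res.append(_first_greater(s, num))
--         _insert_sorted(s, num)
--     res.reverse()
--     return res
-- ===== Notes on version B (the rewrite author's own statement) =====
-- stated objective: faster
-- what changed: Single right-to-left sweep maintaining a sorted accumulator of the suffix, answering each query with the first stored element greater than the current one, instead of re-slicing, re-filtering and taking min over the whole suffix at every index.
import Mathlib
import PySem

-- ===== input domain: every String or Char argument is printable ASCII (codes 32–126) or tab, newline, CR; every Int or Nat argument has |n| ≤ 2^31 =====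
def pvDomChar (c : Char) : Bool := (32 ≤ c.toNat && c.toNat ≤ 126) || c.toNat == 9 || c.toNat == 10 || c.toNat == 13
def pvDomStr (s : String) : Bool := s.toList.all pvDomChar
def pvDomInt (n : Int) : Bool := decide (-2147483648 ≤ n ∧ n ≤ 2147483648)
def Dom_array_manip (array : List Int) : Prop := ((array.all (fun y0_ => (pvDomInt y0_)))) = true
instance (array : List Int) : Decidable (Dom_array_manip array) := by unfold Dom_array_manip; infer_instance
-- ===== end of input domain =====

-- B replaces A's per-index re-scan of the suffix by one right-to-left sweep with a sorted accumulator (alternative decomposition, same worst-case cost).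


-- ===== PORT A =====
-- for each (idx, num): min of the filtered suffix array[idx+1:], -1 when the filter is empty
def array_manip (array : List Int) : List Int :=
  (PySem.List.enumerate array 0).foldl
    (fun new_arr p =>
      let greater_elements :=
        (PySem.List.slice array (some (p.1 + 1)) none).filter (fun n => n > p.2)
      new_arr ++
        [match PySem.List.min? greater_elements (fun x => x) with
         | some m => m
         | none => -1]) []

-- ===== PORT B =====
-- first element of the (sorted) accumulator strictly greater than num, else -1
def pvFirstGreater (s : List Int) (num : Int) : Int :=
  match s with
  | [] => -1
  | x :: xs => if x > num then x else pvFirstGreater xs num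

-- insert num into the sorted accumulator, before the first strictly greater element
def pvInsertSorted (s : List Int) (num : Int) : List Int :=
  match s with
  | [] => [num]
  | x :: xs => if x > num then num :: x :: xs else x :: pvInsertSorted xs num

def array_manip_alt (array : List Int) : List Int :=
  (array.reverse.foldl
    (fun (acc : List Int × List Int) num =>
      (acc.1 ++ [pvFirstGreater acc.2 num], pvInsertSorted acc.2 num))
    ([], [])).1.reverse

-- ===== PRECONDITION & SPEC =====
def Spec_array_manip (array : List Int) (out : List Int) : Prop := out = array_manip_alt array
instance (array : List Int) (out : List Int) : Decidable (Spec_array_manip array out) := by unfold Spec_array_manip; infer_instance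

-- ===== CLAIM (what is proved, stated in full; the proofs are below) =====
def Claim_equal_array_manip : Prop := ∀ (array : List Int), Dom_array_manip array → Spec_array_manip array (array_manip array)

-- ===== LEMMAS AND PROOFS =====

-- reference value: A's per-element body on a suffix
def pvMinGT (num : Int) (l : List Int) : Int :=
  match PySem.List.min? (l.filter (fun n => n > num)) (fun x => x) with
  | some m => m
  | none => -1

-- reference function: both ports compute this
def pvRef : List Int → List Int
  | [] => []
  | x :: xs => pvMinGT x xs :: pvRef xs

lemma pv_foldl_append_map {β γ : Type} (f : β → γ) :
    ∀ (l : List β) (init : List γ),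
      l.foldl (fun acc p => acc ++ [f p]) init = init ++ l.map f := by
  intro l
  induction l with
  | nil => simp
  | cons x xs ih => intro init; simp [List.foldl, ih]

lemma pv_A_main :
    ∀ (suf pre : List Int),
      (PySem.List.enumerate suf (pre.length : Int)).map
        (fun p =>
          match PySem.List.min?
              ((PySem.List.slice (pre ++ suf) (some (p.1 + 1)) none).filter
                (fun n => n > p.2)) (fun x => x) with
          | some m => m
          | none => -1) = pvRef suf := by
  intro suf
  induction suf with
  | nil => intro pre; rfl
  | cons x suf' ih =>
      intro pre
      rw [PySem.List.enumerate_cons]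
      simp only [List.map_cons]
      have hdrop : (pre ++ x :: suf').drop (pre.length + 1) = suf' := by
        have h0 : pre ++ x :: suf' = (pre ++ [x]) ++ suf' := by simp
        have h1 : List.drop ((pre ++ [x]).length) ((pre ++ [x]) ++ suf') = suf' :=
          List.drop_left
        simp only [List.length_append, List.length_cons, List.length_nil] at h1
        rw [h0]
        simp [h1]
      have hslice :
          PySem.List.slice (pre ++ x :: suf') (some ((pre.length : Int) + 1)) none = suf' := by
        have hcast : ((pre.length : Int) + 1) = ((pre.length + 1 : Nat) : Int) := by
          push_cast; ring
        rw [hcast, PySem.List.slice_from_natCast, hdrop]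
      have hIH := ih (pre ++ [x])
      simp only [List.length_append, List.length_cons, List.length_nil,
        List.append_assoc, List.singleton_append] at hIH
      push_cast at hIH
      simp only [pvRef]
      rw [List.cons_eq_cons]
      refine ⟨?_, hIH⟩
      simp only [hslice]
      rfl

lemma pvInsertSorted_perm (s : List Int) (num : Int) :
    (pvInsertSorted s num).Perm (num :: s) := by
  induction s with
  | nil => simp [pvInsertSorted]
  | cons x xs ih =>
      simp only [pvInsertSorted]
      split
      · exact List.Perm.refl _
      · exact (ih.cons x).trans (List.Perm.swap _ _ _)

lemma pvInsertSorted_sorted (s : List Int) (num : Int)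
    (h : s.Pairwise (· ≤ ·)) : (pvInsertSorted s num).Pairwise (· ≤ ·) := by
  induction s with
  | nil => simp [pvInsertSorted]
  | cons x xs ih =>
      simp only [pvInsertSorted]
      rcases List.pairwise_cons.1 h with ⟨hx, hxs⟩
      split
      · rename_i hgt
        refine List.pairwise_cons.2 ⟨?_, h⟩
        intro y hy
        rcases List.mem_cons.1 hy with rfl | hy
        · omega
        · exact le_trans (by omega) (hx y hy)
      · rename_i hle
        refine List.pairwise_cons.2 ⟨?_, ih hxs⟩
        intro y hy
        rcases List.mem_cons.1 ((pvInsertSorted_perm xs num).mem_iff.1 hy) with rfl | hy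
        · omega
        · exact hx y hy

-- value of min? over id is invariant under permutation
lemma pv_minGT_perm (num : Int) {l l' : List Int} (h : l.Perm l') :
    pvMinGT num l = pvMinGT num l' := by
  unfold pvMinGT
  have hf := h.filter (fun n => decide (n > num))
  rcases hm : PySem.List.min? (l.filter (fun n => n > num)) (fun x => x) with _ | m
  · rw [PySem.List.min?_eq_none_iff] at hm
    have h2 : l'.filter (fun n => n > num) = [] := ((hm ▸ hf).symm).eq_nil
    rw [(PySem.List.min?_eq_none_iff _ _).2 h2]
  · have hmem : m ∈ l'.filter (fun n => n > num) := hf.mem_iff.1 (PySem.List.min?_mem hm)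
    rcases hn : PySem.List.min? (l'.filter (fun n => n > num)) (fun x => x) with _ | m'
    · rw [PySem.List.min?_eq_none_iff] at hn
      rw [hn] at hmem
      simp at hmem
    · have h1 : m' ≤ m := PySem.List.min?_isMin hn m hmem
      have h2 : m ≤ m' :=
        PySem.List.min?_isMin hm m' (hf.mem_iff.2 (PySem.List.min?_mem hn))
      simp only []
      omega

-- on a sorted list, the first strictly greater element is the min of the greater ones
lemma pv_firstGreater_sorted (num : Int) :
    ∀ (s : List Int), s.Pairwise (· ≤ ·) →
      pvFirstGreater s num = pvMinGT num s := by
  intro s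
  induction s with
  | nil => intro _; rfl
  | cons x xs ih =>
      intro h
      rcases List.pairwise_cons.1 h with ⟨hx, hxs⟩
      by_cases hgt : x > num
      · simp only [pvFirstGreater, if_pos hgt]
        unfold pvMinGT
        rw [List.filter_cons_of_pos (by simpa using hgt)]
        rcases hm : PySem.List.min? (x :: xs.filter (fun n => n > num)) (fun y => y) with _ | m
        · rw [PySem.List.min?_eq_none_iff] at hm
          simp at hm
        · have hmem := PySem.List.min?_mem hm
          have hmin := PySem.List.min?_isMin hm
          have hxm : x ≤ m := by
            rcases List.mem_cons.1 hmem with rfl | hmm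
            · exact le_refl _
            · exact hx m (List.mem_of_mem_filter hmm)
          have hmx : m ≤ x := hmin x (List.mem_cons_self)
          simp only []
          omega
      · simp only [pvFirstGreater, if_neg hgt]
        rw [ih hxs]
        unfold pvMinGT
        rw [List.filter_cons_of_neg (by simpa using hgt)]

lemma pv_B_main :
    ∀ (l : List Int),
      (l.foldr
        (fun num (acc : List Int × List Int) =>
          (acc.1 ++ [pvFirstGreater acc.2 num], pvInsertSorted acc.2 num))
        ([], [])).1 = (pvRef l).reverse ∧
      ((l.foldr
        (fun num (acc : List Int × List Int) =>
          (acc.1 ++ [pvFirstGreater acc.2 num], pvInsertSorted acc.2 num))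
        ([], [])).2.Perm l ∧
       (l.foldr
        (fun num (acc : List Int × List Int) =>
          (acc.1 ++ [pvFirstGreater acc.2 num], pvInsertSorted acc.2 num))
        ([], [])).2.Pairwise (· ≤ ·)) := by
  intro l
  induction l with
  | nil => exact ⟨rfl, List.Perm.refl _, List.Pairwise.nil⟩
  | cons x xs ih =>
      obtain ⟨h1, h2, h3⟩ := ih
      refine ⟨?_, ?_, ?_⟩
      · simp only [List.foldr_cons, h1]
        rw [pv_firstGreater_sorted x _ h3, pv_minGT_perm x h2]
        simp [pvRef]
      · simp only [List.foldr_cons]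
        exact (pvInsertSorted_perm _ x).trans (h2.cons x)
      · simp only [List.foldr_cons]
        exact pvInsertSorted_sorted _ x h3

lemma pv_A_eq_ref (array : List Int) : array_manip array = pvRef array := by
  unfold array_manip
  rw [pv_foldl_append_map]
  simpa using pv_A_main array []

lemma pv_B_eq_ref (array : List Int) : array_manip_alt array = pvRef array := by
  unfold array_manip_alt
  rw [List.foldl_reverse]
  rw [(pv_B_main array).1]
  simp

-- ===== VERDICT (by name: the statement is the Claim_ definition above) =====
theorem array_manip_spec : Claim_equal_array_manip := by
  intro array _
  unfold Spec_array_manip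
  rw [pv_A_eq_ref, pv_B_eq_ref]
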